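-- pv_equiv track=rewrite | github.com/LeoAlb208/Stage25 | src/feature_extraction.py | max_repeating_char
-- ===== SOURCE A (Python) =====
-- def max_repeating_char(text):
--     """Restituisce il numero massimo di ripetizioni consecutive di uno stesso carattere."""
--     max_count = 0
--     count = 0
--     last_char = ''
--     for char in text:
--         if char == last_char:
--             count += 1
--         else:
--             count = 1
--             last_char = char
--         if count > max_count:
--             max_count = count
--     return max_count
-- ===== SOURCE B (Python) =====
-- def max_repeating_char(text):
--     """Restituisce il numero massimo di ripetizioni consecutive di uno stesso carattere."""
--     best = 0
--     i = 0
--     n = len(text)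
--     while i < n:
--         j = i + 1
--         while j < n and text[j] == text[i]:
--             j += 1
--         best = max(best, j - i)
--         i = j
--     return best
-- ===== Notes on version B (the rewrite author's own statement) =====
-- stated objective: alternative
-- what changed: Replaced the per-character state machine (count/last_char/max_count) by a two-pointer scan that jumps run by run: an inner loop finds the end of each maximal run and the outer loop takes the max of run lengths.
import Mathlib
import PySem

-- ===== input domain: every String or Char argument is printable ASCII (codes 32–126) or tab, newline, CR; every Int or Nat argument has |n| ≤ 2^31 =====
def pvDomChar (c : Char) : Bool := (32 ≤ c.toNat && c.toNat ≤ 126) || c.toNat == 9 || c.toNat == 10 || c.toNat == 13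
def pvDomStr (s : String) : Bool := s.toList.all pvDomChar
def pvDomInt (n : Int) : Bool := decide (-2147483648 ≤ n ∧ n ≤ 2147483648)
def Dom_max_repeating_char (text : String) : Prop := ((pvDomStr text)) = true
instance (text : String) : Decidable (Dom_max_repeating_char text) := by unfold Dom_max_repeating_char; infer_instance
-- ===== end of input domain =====

-- B replaces A's per-character state machine by a two-pointer scan that jumps run by run (objective: alternative; same cost).

-- ===== PORT A =====
-- A's loop body: update (max_count, count, last_char) for one character.
-- last_char starts as '' (never equal to any char); modelled as Option Char, none initially.
def pvStepA : (Int × Int × Option Char) → Char → (Int × Int × Option Char)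
  | (m, k, last), c =>
      let s := if some c = last then (k + 1, last) else ((1 : Int), some c)
      if s.1 > m then (s.1, s.1, s.2) else (m, s.1, s.2)

def max_repeating_char (text : String) : Int :=
  (text.toList.foldl pvStepA (0, 0, (none : Option Char))).1

-- ===== PORT B =====
-- Source B's outer while loop: each step consumes one maximal run (the inner while = takeWhile)
-- and updates best with the run's length.
def pvAltGo : List Char → Int → Int
  | [], best => best
  | c :: rest, best =>
      pvAltGo (rest.dropWhile (· == c)) (max best (1 + ((rest.takeWhile (· == c)).length : Int)))
  termination_by l _ => l.length
  decreasing_by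
    exact Nat.lt_succ_of_le (List.length_dropWhile_le _ _)

def max_repeating_char_alt (text : String) : Int :=
  pvAltGo text.toList 0

-- ===== PRECONDITION & SPEC =====
def Spec_max_repeating_char (text : String) (out : Int) : Prop := out = max_repeating_char_alt text
instance (text : String) (out : Int) : Decidable (Spec_max_repeating_char text out) := by unfold Spec_max_repeating_char; infer_instance

-- ===== CLAIM (what is proved, stated in full; the proofs are below) =====
def Claim_equal_max_repeating_char : Prop := ∀ (text : String), Dom_max_repeating_char text → Spec_max_repeating_char text (max_repeating_char text)

-- ===== LEMMAS AND PROOFS =====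

-- "best run reachable from here, given that the pending run has char d and length k"
def pvG (d : Char) (k : Int) : List Char → Int
  | [] => k
  | c :: l => if c = d then pvG d (k + 1) l else max k (pvG c 1 l)

theorem pvG_ge (l : List Char) : ∀ (d : Char) (k : Int), k ≤ pvG d k l := by
  induction l with
  | nil => intro d k; simp [pvG]
  | cons c l ih =>
      intro d k
      by_cases h : c = d <;> simp only [pvG, h, if_true, if_false]
      · exact le_trans (by omega) (ih d (k + 1))
      · exact le_max_left _ _

theorem pvStepA_eq (m k : Int) (d : Char) : pvStepA (m, k, some d) d = (max m (k + 1), k + 1, some d) := by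
  simp only [pvStepA, if_true]
  split_ifs with h1 <;> simp <;> omega

theorem pvStepA_ne (m k : Int) (c d : Char) (hcd : c ≠ d) (hm : 1 ≤ m) :
    pvStepA (m, k, some d) c = (m, 1, some c) := by
  simp only [pvStepA]
  rw [if_neg (fun hc => hcd (Option.some.inj hc))]
  rw [if_neg (by omega)]

theorem pvFoldA (l : List Char) : ∀ (m k : Int) (d : Char), 1 ≤ k → k ≤ m →
    (l.foldl pvStepA (m, k, some d)).1 = max m (pvG d k l) := by
  induction l with
  | nil => intro m k d h1 h2; simp [pvG]; omega
  | cons c l ih =>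
      intro m k d h1 h2
      by_cases h : c = d
      · subst h
        rw [List.foldl_cons, pvStepA_eq, ih _ _ _ (by omega) (le_max_right _ _)]
        have hge := pvG_ge l c (k + 1)
        rw [show pvG c k (c :: l) = pvG c (k + 1) l from by simp [pvG]]
        omega
      · rw [List.foldl_cons, pvStepA_ne m k c d h (by omega), ih _ _ _ (by omega) (by omega)]
        have hge := pvG_ge l c 1
        rw [show pvG d k (c :: l) = max k (pvG c 1 l) from by simp [pvG, h]]
        omega

theorem pvG_alt (l : List Char) : ∀ (c : Char) (k b : Int),
    max b (pvG c k l) =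
      pvAltGo (l.dropWhile (· == c)) (max b (k + ((l.takeWhile (· == c)).length : Int))) := by
  induction l with
  | nil => intro c k b; simp [pvG, pvAltGo]
  | cons a t ih =>
      intro c k b
      by_cases h : a = c
      · subst h
        have ht : (a :: t).takeWhile (· == a) = a :: t.takeWhile (· == a) := by simp
        have hd : (a :: t).dropWhile (· == a) = t.dropWhile (· == a) := by simp
        rw [ht, hd, List.length_cons]
        push_cast
        rw [show k + (((t.takeWhile (· == a)).length : Int) + 1)
              = (k + 1) + ((t.takeWhile (· == a)).length : Int) from by ring]
        rw [show pvG a k (a :: t) = pvG a (k + 1) t from by simp [pvG]]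
        exact ih a (k + 1) b
      · have ht : (a :: t).takeWhile (· == c) = [] := by simp [h]
        have hd : (a :: t).dropWhile (· == c) = a :: t := by simp [h]
        rw [ht, hd]
        simp only [List.length_nil, Int.natCast_zero, add_zero]
        rw [show pvAltGo (a :: t) (max b k)
              = pvAltGo (t.dropWhile (· == a)) (max (max b k) (1 + ((t.takeWhile (· == a)).length : Int))) from by rw [pvAltGo]]
        rw [show pvG c k (a :: t) = max k (pvG a 1 t) from by simp [pvG, h]]
        rw [← max_assoc]
        exact ih a 1 (max b k)

-- ===== VERDICT (by name: the statement is the Claim_ definition above) =====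
theorem max_repeating_char_spec : Claim_equal_max_repeating_char := by
  intro text _
  unfold Spec_max_repeating_char max_repeating_char max_repeating_char_alt
  cases hl : text.toList with
  | nil => simp [pvAltGo]
  | cons c t =>
      have hstep : pvStepA (0, 0, (none : Option Char)) c = (1, 1, some c) := by
        simp [pvStepA]
      rw [List.foldl_cons, hstep, pvFoldA t 1 1 c (by omega) (by omega)]
      rw [show pvAltGo (c :: t) 0
            = pvAltGo (t.dropWhile (· == c)) (max 0 (1 + ((t.takeWhile (· == c)).length : Int))) from by rw [pvAltGo]]
      have hB := pvG_alt t c 1 0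
      have hge := pvG_ge t c 1
      rw [← hB]
      omega
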